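-- pv_equiv track=rewrite | github.com/Hmbown/Bachbot | bachbot/composition/generators/pattern_fill.py | _has_forbidden_parallel
-- ===== SOURCE A (Python) =====
-- from itertools import combinations
--
-- PERFECT_INTERVALS = {0, 7}
--
-- def _motion(left: int, right: int) -> int:
--     if right > left:
--         return 1
--     if right < left:
--         return -1
--     return 0
--
-- _OUTER_VOICES = frozenset({"Soprano:1", "Bass:1"})
--
-- def _has_forbidden_parallel(previous: dict[str, int], current: dict[str, int]) -> bool:
--     if not previous:
--         return False
--     shared = set(previous) & set(current)
--     for upper, lower in combinations(shared, 2):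
--         previous_interval = abs(previous[upper] - previous[lower]) % 12
--         current_interval = abs(current[upper] - current[lower]) % 12
--         upper_motion = _motion(previous[upper], current[upper])
--         lower_motion = _motion(previous[lower], current[lower])
--         if previous_interval in PERFECT_INTERVALS and current_interval in PERFECT_INTERVALS and upper_motion == lower_motion != 0:
--             if previous_interval == current_interval:
--                 return True  # True parallel 5ths/8ves — always forbidden
--             if {upper, lower} == _OUTER_VOICES:
--                 return True  # Direct perfect interval — forbidden in outer voices only
--     return False
-- ===== SOURCE B (Python) =====
-- PERFECT_INTERVALS = (0, 7)
--
-- _OUTER_VOICES = frozenset({"Soprano:1", "Bass:1"})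
--
--
-- def _has_forbidden_parallel(previous: dict, current: dict) -> bool:
--     if not previous:
--         return False
--     # partition the shared voices by their direction of motion; a pair can only
--     # be a forbidden parallel when both voices move the same nonzero direction,
--     # so static voices are dropped and only same-bucket pairs are examined.
--     ascending = []
--     descending = []
--     for voice in previous:
--         if voice in current:
--             delta = current[voice] - previous[voice]
--             if delta > 0:
--                 ascending.append(voice)
--             elif delta < 0:
--                 descending.append(voice)
--     for bucket in (ascending, descending):
--         for i, upper in enumerate(bucket):
--             for lower in bucket[i + 1:]:
--                 prev_iv = abs(previous[upper] - previous[lower]) % 12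
--                 cur_iv = abs(current[upper] - current[lower]) % 12
--                 if prev_iv in PERFECT_INTERVALS and cur_iv in PERFECT_INTERVALS and (
--                     prev_iv == cur_iv or {upper, lower} == _OUTER_VOICES
--                 ):
--                     return True
--     return False
-- ===== Notes on version B (the rewrite author's own statement) =====
-- stated objective: alternative
-- what changed: B partitions the shared voices by motion direction into ascending/descending buckets in one pass, drops static voices, and only scans pairs inside each bucket (so the motion-equality test disappears from the pair check), instead of A's flat combinations scan over all shared pairs with a per-pair motion comparison.
import Mathlib
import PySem

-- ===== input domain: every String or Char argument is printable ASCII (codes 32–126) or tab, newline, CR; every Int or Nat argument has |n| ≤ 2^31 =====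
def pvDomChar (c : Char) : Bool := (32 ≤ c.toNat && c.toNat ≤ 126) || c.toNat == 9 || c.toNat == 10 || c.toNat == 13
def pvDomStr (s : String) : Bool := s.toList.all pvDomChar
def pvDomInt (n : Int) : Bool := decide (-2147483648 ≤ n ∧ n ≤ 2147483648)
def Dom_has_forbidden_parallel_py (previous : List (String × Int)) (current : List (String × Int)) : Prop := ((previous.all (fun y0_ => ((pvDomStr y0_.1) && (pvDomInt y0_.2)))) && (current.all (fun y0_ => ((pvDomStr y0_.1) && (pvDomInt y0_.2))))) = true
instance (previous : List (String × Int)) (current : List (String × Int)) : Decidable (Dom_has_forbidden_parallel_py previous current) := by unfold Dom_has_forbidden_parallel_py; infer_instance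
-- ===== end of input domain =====

-- B partitions the shared voices by motion direction and only scans pairs inside each
-- bucket, instead of A's flat combinations scan with a per-pair motion comparison
-- (objective: alternative decomposition, same worst-case cost).

-- ===== PORT A =====
-- dict lookup previous[k] (keys looked up are always present; first-match association-list lookup)
def pvGet (d : List (String × Int)) (k : String) : Int :=
  PySem.Dict.getD (PySem.Dict.mk d) k 0

-- PERFECT_INTERVALS = {0, 7}
def pvPERFECT : PySem.Set Int := PySem.Set.ofList [0, 7]

-- _motion
def pvMotion (left right : Int) : Int :=
  if right > left then 1 else if right < left then -1 else 0

-- _OUTER_VOICES comparison {upper, lower} == _OUTER_VOICES (set equality)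
def pvIsOuter (upper lower : String) : Bool :=
  PySem.Set.equal (PySem.Set.ofList [upper, lower]) (PySem.Set.ofList ["Soprano:1", "Bass:1"])

-- itertools.combinations(shared, 2)
def pvPairs : List String → List (String × String)
  | [] => []
  | x :: xs => xs.map (fun y => (x, y)) ++ pvPairs xs

-- the 'for upper, lower in combinations(shared, 2)' loop with its early returns
def pvLoopA (previous current : List (String × Int)) : List (String × String) → Bool
  | [] => false
  | (upper, lower) :: rest =>
    let previous_interval := PySem.Int.mod |pvGet previous upper - pvGet previous lower| 12
    let current_interval := PySem.Int.mod |pvGet current upper - pvGet current lower| 12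
    let upper_motion := pvMotion (pvGet previous upper) (pvGet current upper)
    let lower_motion := pvMotion (pvGet previous lower) (pvGet current lower)
    if pvPERFECT.contains previous_interval && pvPERFECT.contains current_interval &&
        (upper_motion == lower_motion && lower_motion != 0) then
      if previous_interval == current_interval then true
      else if pvIsOuter upper lower then true
      else pvLoopA previous current rest
    else pvLoopA previous current rest

def has_forbidden_parallel_py (previous : List (String × Int)) (current : List (String × Int)) : Bool :=
  if previous.isEmpty then false
  else
    pvLoopA previous current
      (pvPairs (PySem.Set.inter (PySem.Set.ofList (previous.map Prod.fst))
        (PySem.Set.ofList (current.map Prod.fst))))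

-- ===== PORT B =====
-- the per-pair test B performs inside a bucket (no motion test needed there)
def pvCondB (previous current : List (String × Int)) (upper lower : String) : Bool :=
  let prev_iv := PySem.Int.mod |pvGet previous upper - pvGet previous lower| 12
  let cur_iv := PySem.Int.mod |pvGet current upper - pvGet current lower| 12
  (prev_iv == 0 || prev_iv == 7) && (cur_iv == 0 || cur_iv == 7) &&
    (prev_iv == cur_iv || pvIsOuter upper lower)

-- single pass over the voices of previous: classify the shared ones by motion direction
def pvBuckets (previous current : List (String × Int)) : List String × List String :=
  (PySem.Set.ofList (previous.map Prod.fst)).foldl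
    (fun acc voice =>
      if (PySem.Dict.mk current).contains voice then
        let delta := pvGet current voice - pvGet previous voice
        if delta > 0 then (acc.1 ++ [voice], acc.2)
        else if delta < 0 then (acc.1, acc.2 ++ [voice])
        else acc
      else acc)
    ([], [])

-- 'for i, upper in enumerate(bucket): for lower in bucket[i+1:]' with early return
def pvScanBucket (previous current : List (String × Int)) : List String → Bool
  | [] => false
  | upper :: rest =>
    rest.any (fun lower => pvCondB previous current upper lower) ||
      pvScanBucket previous current rest

def has_forbidden_parallel_py_alt (previous : List (String × Int)) (current : List (String × Int)) : Bool :=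
  if previous.isEmpty then false
  else
    let buckets := pvBuckets previous current
    pvScanBucket previous current buckets.1 || pvScanBucket previous current buckets.2

-- ===== PRECONDITION & SPEC =====
def Spec_has_forbidden_parallel_py (previous : List (String × Int)) (current : List (String × Int)) (out : Bool) : Prop := out = has_forbidden_parallel_py_alt previous current
instance (previous : List (String × Int)) (current : List (String × Int)) (out : Bool) : Decidable (Spec_has_forbidden_parallel_py previous current out) := by unfold Spec_has_forbidden_parallel_py; infer_instance

-- ===== CLAIM (what is proved, stated in full; the proofs are below) =====
def Claim_equal_has_forbidden_parallel_py : Prop := ∀ (previous : List (String × Int)) (current : List (String × Int)), Dom_has_forbidden_parallel_py previous current → Spec_has_forbidden_parallel_py previous current (has_forbidden_parallel_py previous current)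

-- ===== LEMMAS AND PROOFS =====

-- the full per-pair condition A's loop tests (motion included)
def pvCondA (previous current : List (String × Int)) (upper lower : String) : Bool :=
  (pvPERFECT.contains (PySem.Int.mod |pvGet previous upper - pvGet previous lower| 12) &&
    pvPERFECT.contains (PySem.Int.mod |pvGet current upper - pvGet current lower| 12) &&
    (pvMotion (pvGet previous upper) (pvGet current upper) ==
        pvMotion (pvGet previous lower) (pvGet current lower) &&
      pvMotion (pvGet previous lower) (pvGet current lower) != 0)) &&
    (PySem.Int.mod |pvGet previous upper - pvGet previous lower| 12 ==
        PySem.Int.mod |pvGet current upper - pvGet current lower| 12 || pvIsOuter upper lower)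

theorem pvIfChain (c c1 c2 r : Bool) :
    (if c then (if c1 then true else if c2 then true else r) else r) = ((c && (c1 || c2)) || r) := by
  cases c <;> cases c1 <;> cases c2 <;> cases r <;> rfl

theorem pvLoopA_eq_any (previous current : List (String × Int)) (ps : List (String × String)) :
    pvLoopA previous current ps = ps.any (fun q => pvCondA previous current q.1 q.2) := by
  induction ps with
  | nil => rfl
  | cons p rest ih =>
    obtain ⟨u, l⟩ := p
    simp only [pvLoopA, List.any_cons, ← ih]
    rw [pvIfChain]
    rfl

theorem pvScanBucket_eq_any (previous current : List (String × Int)) (xs : List String) :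
    pvScanBucket previous current xs = (pvPairs xs).any (fun q => pvCondB previous current q.1 q.2) := by
  induction xs with
  | nil => rfl
  | cons x rest ih =>
    simp [pvScanBucket, pvPairs, ih, List.any_map, Function.comp_def]

theorem pvPairs_filter (p : String → Bool) (xs : List String) :
    pvPairs (xs.filter p) = (pvPairs xs).filter (fun q => p q.1 && p q.2) := by
  induction xs with
  | nil => rfl
  | cons x rest ih =>
    by_cases hx : p x = true
    · simp [pvPairs, hx, ih, List.filter_append, List.filter_map, Function.comp_def]
    · rw [Bool.not_eq_true] at hx
      simp [pvPairs, hx, ih, List.filter_append, List.filter_map, Function.comp_def]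

theorem pvBuckets_foldl (previous current : List (String × Int)) (xs : List String)
    (acc : List String × List String) :
    xs.foldl
      (fun acc voice =>
        if (PySem.Dict.mk current).contains voice then
          let delta := pvGet current voice - pvGet previous voice
          if delta > 0 then (acc.1 ++ [voice], acc.2)
          else if delta < 0 then (acc.1, acc.2 ++ [voice])
          else acc
        else acc) acc =
      (acc.1 ++ xs.filter (fun v => (PySem.Dict.mk current).contains v &&
          decide (pvGet current v - pvGet previous v > 0)),
       acc.2 ++ xs.filter (fun v => (PySem.Dict.mk current).contains v &&
          decide (pvGet current v - pvGet previous v < 0))) := by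
  induction xs generalizing acc with
  | nil => simp
  | cons x rest ih =>
    rw [List.foldl_cons, ih]
    simp only [List.filter_cons]
    by_cases hc : (PySem.Dict.mk current).contains x = true
    · rcases lt_trichotomy (pvGet current x - pvGet previous x) 0 with h | h | h
      · simp [hc, h, (show ¬ pvGet previous x < pvGet current x by omega)]
      · simp [hc, h]
      · simp [hc, (show ¬ pvGet current x - pvGet previous x < 0 by omega),
          (show pvGet previous x < pvGet current x by omega)]
    · rw [Bool.not_eq_true] at hc
      simp [hc]

-- motion equality (nonzero) is exactly "both ascend or both descend"
theorem pvMotion_char (pu cu pl cl : Int) :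
    ((pvMotion pu cu == pvMotion pl cl) && (pvMotion pl cl != 0)) =
      ((decide (cu - pu > 0) && decide (cl - pl > 0)) ||
       (decide (cu - pu < 0) && decide (cl - pl < 0))) := by
  simp only [pvMotion]
  split_ifs <;> simp <;> omega

theorem pvAny_congr {a : Type} (xs : List a) (f g : a → Bool) (h : ∀ x ∈ xs, f x = g x) :
    xs.any f = xs.any g := by
  induction xs with
  | nil => rfl
  | cons x rest ih =>
    simp only [List.any_cons, h x (by simp), ih (fun y hy => h y (by simp [hy]))]

theorem pvAny_or {a : Type} (xs : List a) (f g : a → Bool) :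
    (xs.any fun x => f x || g x) = (xs.any f || xs.any g) := by
  induction xs with
  | nil => rfl
  | cons x rest ih =>
    simp only [List.any_cons, ih]
    cases f x <;> cases g x <;> cases rest.any f <;> cases rest.any g <;> rfl

-- membership in current's key set: A's form and B's form agree
theorem pvContains_eq (current : List (String × Int)) (v : String) :
    (PySem.Set.ofList (current.map Prod.fst)).contains v = (PySem.Dict.mk current).contains v := by
  rw [PySem.Dict.contains_eq_decide_mem_keys]
  simp [PySem.Set.contains, PySem.Dict.keys]

-- PERFECT_INTERVALS membership as the two comparisons B uses
theorem pvPerfect_eq (n : Int) : pvPERFECT.contains n = (n == 0 || n == 7) := by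
  show ([(0:Int), 7].elem n) = (n == 0 || n == 7)
  cases h0 : n == 0 <;> cases h7 : n == 7 <;> simp [List.elem, h0, h7]

-- pointwise: A's full pair condition over shared voices equals B's bucketed conditions
theorem pvPointwise (previous current : List (String × Int)) (u l : String) :
    (((PySem.Set.ofList (current.map Prod.fst)).contains u &&
        (PySem.Set.ofList (current.map Prod.fst)).contains l) &&
        pvCondA previous current u l) =
      ((((PySem.Dict.mk current).contains u && decide (pvGet current u - pvGet previous u > 0)) &&
          ((PySem.Dict.mk current).contains l && decide (pvGet current l - pvGet previous l > 0)) &&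
          pvCondB previous current u l) ||
       (((PySem.Dict.mk current).contains u && decide (pvGet current u - pvGet previous u < 0)) &&
          ((PySem.Dict.mk current).contains l && decide (pvGet current l - pvGet previous l < 0)) &&
          pvCondB previous current u l)) := by
  simp only [pvCondA, pvCondB, pvContains_eq, pvMotion_char, pvPerfect_eq]
  generalize (PySem.Dict.mk current).contains u = c1
  generalize (PySem.Dict.mk current).contains l = c2
  generalize decide (pvGet current u - pvGet previous u > 0) = a1
  generalize decide (pvGet current l - pvGet previous l > 0) = a2
  generalize decide (pvGet current u - pvGet previous u < 0) = b1
  generalize decide (pvGet current l - pvGet previous l < 0) = b2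
  generalize (PySem.Int.mod |pvGet previous u - pvGet previous l| 12 == 0 ||
    PySem.Int.mod |pvGet previous u - pvGet previous l| 12 == 7) = p1
  generalize (PySem.Int.mod |pvGet current u - pvGet current l| 12 == 0 ||
    PySem.Int.mod |pvGet current u - pvGet current l| 12 == 7) = p2
  generalize (PySem.Int.mod |pvGet previous u - pvGet previous l| 12 ==
    PySem.Int.mod |pvGet current u - pvGet current l| 12 || pvIsOuter u l) = e
  revert c1 c2 a1 a2 b1 b2 p1 p2 e
  decide

-- ===== VERDICT (by name: the statement is the Claim_ definition above) =====
theorem has_forbidden_parallel_py_spec : Claim_equal_has_forbidden_parallel_py := by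
  intro previous current _
  unfold Spec_has_forbidden_parallel_py
  unfold has_forbidden_parallel_py has_forbidden_parallel_py_alt
  by_cases hemp : previous.isEmpty
  · simp [hemp]
  · simp only [hemp, if_false, Bool.false_eq_true]
    rw [pvLoopA_eq_any, pvScanBucket_eq_any, pvScanBucket_eq_any]
    unfold pvBuckets
    rw [pvBuckets_foldl]
    simp only [List.nil_append]
    show _ = _
    rw [PySem.Set.inter, pvPairs_filter, pvPairs_filter, pvPairs_filter,
      List.any_filter, List.any_filter, List.any_filter, ← pvAny_or]
    apply pvAny_congr
    intro q _
    obtain ⟨u, l⟩ := q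
    exact pvPointwise previous current u l
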